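-- pv_equiv track=rewrite | github.com/vcchang-temp/coding-practice | Misc/confusingNumber/confusingNumber.py | isValidNum
-- ===== SOURCE A (Python) =====
-- def isValidNum(digit: int, upperBound: int) -> int:
--     validNums = {
--         "0" : "0",
--         "1" : "1",
--         "6" : "9",
--         "8" : "8",
--         "9" : "6"
--     }
--
--     dStr = str(digit)
--     confusingNum = []
--     for n in dStr:
--         if n in validNums:
--             confusingNum.append(validNums[n])
--         else:
--             return False
--
--     confusingNum = int("".join(confusingNum))
--     return confusingNum != digit and confusingNum >= 1 and confusingNum <= upperBound
-- ===== SOURCE B (Python) =====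
-- def isValidNum(digit: int, upperBound: int) -> int:
--     rot = {0: 0, 1: 1, 6: 9, 8: 8, 9: 6}
--     if digit < 0:
--         return False
--     n, place, result = digit, 1, 0
--     while n:
--         d = n % 10
--         if d not in rot:
--             return False
--         result += rot[d] * place
--         place *= 10
--         n //= 10
--     return result != digit and 1 <= result <= upperBound
-- ===== Notes on version B (the rewrite author's own statement) =====
-- stated objective: alternative
-- what changed: B replaces A's string conversion, per-character dict mapping, list building and int() re-parse by a purely arithmetic digit loop (n % 10 / n // 10 with a running place value), with an explicit negative guard replacing A's reliance on '-' missing from the map.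
import Mathlib
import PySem

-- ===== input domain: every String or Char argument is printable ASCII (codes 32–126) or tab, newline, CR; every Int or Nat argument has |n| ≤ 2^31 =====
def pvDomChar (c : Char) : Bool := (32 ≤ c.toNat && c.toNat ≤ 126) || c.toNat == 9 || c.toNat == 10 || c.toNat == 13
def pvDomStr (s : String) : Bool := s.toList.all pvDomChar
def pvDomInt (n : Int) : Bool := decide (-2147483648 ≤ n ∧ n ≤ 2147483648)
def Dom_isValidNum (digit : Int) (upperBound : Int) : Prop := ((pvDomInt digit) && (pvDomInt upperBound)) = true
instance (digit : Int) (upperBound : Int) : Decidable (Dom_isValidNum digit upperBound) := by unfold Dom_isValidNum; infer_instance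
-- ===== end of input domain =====

-- B replaces A's string/dict/int()-reparse pipeline by a purely arithmetic digit loop (n % 10, n // 10,
-- running place value) with an explicit negative guard; same return value on every input.

-- ===== PORT A =====
-- the literal dict validNums = {"0":"0","1":"1","6":"9","8":"8","9":"6"}
def validNums : PySem.Dict String String :=
  PySem.Dict.ofList [("0", "0"), ("1", "1"), ("6", "9"), ("8", "8"), ("9", "6")]

-- the 'for n in dStr: …' loop with its early 'return False' (none) and list append
def isValidNumGo : List Char → List String → Option (List String)
  | [], acc => some acc
  | c :: cs, acc =>
    if validNums.contains (String.ofList [c]) then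
      isValidNumGo cs (acc ++ [validNums.getD (String.ofList [c]) ""])
    else none

-- int(s) for base 10, ported BY HAND step for step (exact: strip of int()-whitespace on both ends,
-- optional sign, ASCII digits with single '_' separators, none = ValueError).  It is ported by hand
-- rather than as PySem.Int.ofStr? because the proof below must unfold the parser on a symbolic digit
-- string and PySem's parser keeps its digit loop private (its equations cannot be cited in lemmas).
def pvStripInt (cs : List Char) : List Char :=
  (List.dropWhile PySem.Int.isIntSpace (List.dropWhile PySem.Int.isIntSpace cs).reverse).reverse

def pvDigits? : List Char → Bool → Nat → Option Nat
  | [], afterDigit, acc => if afterDigit = true then some acc else none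
  | c :: rest, afterDigit, acc =>
    if c.isDigit = true then pvDigits? rest true (acc * 10 + (c.toNat - '0'.toNat))
    else
      if c = '_' ∧ afterDigit = true then
        match rest with
        | d :: _ => if d.isDigit = true then pvDigits? rest false acc else none
        | [] => none
      else none

def pvSigned? : List Char → Option Int
  | '-' :: ds => (pvDigits? ds false 0).map (fun a => -(a : Int))
  | '+' :: ds => (pvDigits? ds false 0).map (fun a => (a : Int))
  | ds => (pvDigits? ds false 0).map (fun a => (a : Int))

def pvInt? (s : String) : Option Int := pvSigned? (pvStripInt s.toList)

def isValidNum (digit : Int) (upperBound : Int) : Bool :=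
  let dStr := PySem.Int.toStr digit
  match isValidNumGo dStr.toList [] with
  | none => false                               -- 'return False' taken inside the loop
  | some confusingNum =>
    match pvInt? (PySem.Str.join "" confusingNum) with
    | none => false                             -- unreachable: the joined string is a nonempty digit string
    | some c => decide (c ≠ digit) && decide (1 ≤ c) && decide (c ≤ upperBound)

-- ===== PORT B =====
-- the literal dict rot = {0:0, 1:1, 6:9, 8:8, 9:6}
def rotDict : PySem.Dict Int Int :=
  PySem.Dict.ofList [(0, 0), (1, 1), (6, 9), (8, 8), (9, 6)]

-- the 'while n:' loop (entered only with digit ≥ 0, hence n : Nat); 'return False' inside = none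
def isValidNumAltGo (n : Nat) (place result : Int) : Option Int :=
  if n = 0 then some result
  else
    let d : Int := ((n % 10 : Nat) : Int)
    if rotDict.contains d then
      isValidNumAltGo (n / 10) (place * 10) (result + rotDict.getD d 0 * place)
    else none
  termination_by n
  decreasing_by exact Nat.div_lt_self (Nat.pos_of_ne_zero (by assumption)) (by omega)

def isValidNum_alt (digit : Int) (upperBound : Int) : Bool :=
  if digit < 0 then false
  else
    match isValidNumAltGo digit.toNat 1 0 with
    | none => false
    | some result => decide (result ≠ digit) && decide (1 ≤ result) && decide (result ≤ upperBound)

-- ===== PRECONDITION & SPEC =====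
def Spec_isValidNum (digit : Int) (upperBound : Int) (out : Bool) : Prop := out = isValidNum_alt digit upperBound
instance (digit : Int) (upperBound : Int) (out : Bool) : Decidable (Spec_isValidNum digit upperBound out) := by unfold Spec_isValidNum; infer_instance

-- ===== CLAIM (what is proved, stated in full; the proofs are below) =====
def Claim_equal_isValidNum : Prop := ∀ (digit : Int) (upperBound : Int), Dom_isValidNum digit upperBound → Spec_isValidNum digit upperBound (isValidNum digit upperBound)

-- ===== LEMMAS AND PROOFS =====

-- decimal digit characters of n, most significant first, built by append (= Nat.toDigits 10 n)
def rep10 (n : Nat) : List Char :=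
  if n / 10 = 0 then [Nat.digitChar (n % 10)]
  else rep10 (n / 10) ++ [Nat.digitChar (n % 10)]
  termination_by n
  decreasing_by exact Nat.div_lt_self (Nat.pos_of_ne_zero (by omega)) (by omega)

-- the rotation of one decimal digit
def rotN (d : Nat) : Option Nat :=
  if d = 0 then some 0 else if d = 1 then some 1 else if d = 6 then some 9
  else if d = 8 then some 8 else if d = 9 then some 6 else none

-- the in-place rotated value of n (none if some digit has no rotation)
def rotVal (n : Nat) : Option Nat :=
  if n / 10 = 0 then rotN (n % 10)
  else (rotVal (n / 10)).bind fun h => (rotN (n % 10)).map fun r => h * 10 + r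
  termination_by n
  decreasing_by exact Nat.div_lt_self (Nat.pos_of_ne_zero (by omega)) (by omega)

def chValid (c : Char) : Bool := validNums.contains (String.ofList [c])
def rotStr (c : Char) : String := validNums.getD (String.ofList [c]) ""
def valNat (cs : List Char) : Nat := cs.foldl (fun a c => a * 10 + (c.toNat - 48)) 0

theorem toDigitsCore_eq_rep10 : ∀ (f n : Nat) (ds : List Char), n < 10 ^ (f + 1) →
    Nat.toDigitsCore 10 (f + 1) n ds = rep10 n ++ ds := by
  intro f
  induction f with
  | zero =>
    intro n ds h
    have h10 : n / 10 = 0 := by omega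
    rw [Nat.toDigitsCore, rep10]
    simp [h10]
  | succ f ih =>
    intro n ds h
    rw [Nat.toDigitsCore, rep10]
    by_cases h10 : n / 10 = 0
    · simp [h10]
    · have hlt : n / 10 < 10 ^ (f + 1) := by
        rw [Nat.div_lt_iff_lt_mul (by norm_num)]
        calc n < 10 ^ (f + 1 + 1) := h
        _ = 10 ^ (f + 1) * 10 := by ring
      simp only [h10, if_false]
      rw [ih (n / 10) _ hlt, List.append_assoc]
      simp

theorem toDigits_eq_rep10 (n : Nat) : Nat.toDigits 10 n = rep10 n := by
  have h : n < 10 ^ (n + 1) := by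
    calc n < 10 ^ n := Nat.lt_pow_self (by norm_num)
    _ ≤ 10 ^ (n + 1) := Nat.pow_le_pow_right (by norm_num) (by omega)
  simpa using toDigitsCore_eq_rep10 n n [] h

theorem isValidNumGo_char (cs : List Char) : ∀ (acc : List String),
    isValidNumGo cs acc = if cs.all chValid then some (acc ++ cs.map rotStr) else none := by
  induction cs with
  | nil => intro acc; simp [isValidNumGo]
  | cons c cs ih =>
    intro acc
    by_cases hc : chValid c
    · rw [isValidNumGo]
      rw [show validNums.contains (String.ofList [c]) = true from hc, if_pos rfl, ih]
      by_cases hall : cs.all chValid = true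
      · simp [hall, hc, rotStr]
      · simp [hall, hc]
    · rw [isValidNumGo]
      rw [show validNums.contains (String.ofList [c]) = false by simpa [chValid] using hc]
      simp [hc]

theorem digitChar_isDigit (d : Nat) (h : d < 10) : (Nat.digitChar d).isDigit = true := by
  interval_cases d <;> decide

theorem digitChar_toNat (d : Nat) (h : d < 10) : (Nat.digitChar d).toNat = 48 + d := by
  interval_cases d <;> decide

theorem rep10_ne_nil (n : Nat) : rep10 n ≠ [] := by
  rw [rep10]
  split <;> simp

theorem rep10_all_digit (n : Nat) : (rep10 n).all Char.isDigit = true := by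
  induction n using Nat.strong_induction_on with
  | _ n ih =>
    rw [rep10]
    by_cases h10 : n / 10 = 0
    · simp [h10, digitChar_isDigit (n % 10) (by omega)]
    · have := ih (n / 10) (Nat.div_lt_self (by omega) (by omega))
      simp [h10, this, digitChar_isDigit (n % 10) (by omega)]

theorem valNat_rep10 (n : Nat) : valNat (rep10 n) = n := by
  induction n using Nat.strong_induction_on with
  | _ n ih =>
    rw [rep10]
    by_cases h10 : n / 10 = 0
    · simp [h10, valNat, List.foldl, digitChar_toNat (n % 10) (by omega)]
      omega
    · have hv := ih (n / 10) (Nat.div_lt_self (by omega) (by omega))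
      simp only [h10, if_false, valNat, List.foldl_append, List.foldl]
      rw [show (rep10 (n / 10)).foldl (fun a c => a * 10 + (c.toNat - 48)) 0 = n / 10 from hv]
      rw [digitChar_toNat (n % 10) (by omega)]
      omega

theorem chValid_digitChar (d : Nat) (h : d < 10) : chValid (Nat.digitChar d) = (rotN d).isSome := by
  interval_cases d <;> decide

theorem rotStr_digitChar (d r : Nat) (h : d < 10) (hr : rotN d = some r) :
    rotStr (Nat.digitChar d) = String.ofList [Nat.digitChar r] := by
  interval_cases d <;> simp_all [rotN] <;> subst hr <;> decide

theorem rotN_lt (d r : Nat) (hr : rotN d = some r) : r < 10 := by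
  unfold rotN at hr; split_ifs at hr <;> simp_all <;> omega

theorem rotN_ne_zero (d r : Nat) (hd : d ≠ 0) (hr : rotN d = some r) : r ≠ 0 := by
  unfold rotN at hr; split_ifs at hr <;> simp_all <;> omega

-- main A-side characterisation: validity of the digit string and the rotated string itself
theorem rep10_small (n : Nat) (h : n / 10 = 0) : rep10 n = [Nat.digitChar (n % 10)] := by
  rw [rep10, if_pos h]

theorem rep10_large (n : Nat) (h : ¬ n / 10 = 0) :
    rep10 n = rep10 (n / 10) ++ [Nat.digitChar (n % 10)] := by
  rw [rep10, if_neg h]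

theorem rotVal_small (n : Nat) (h : n / 10 = 0) : rotVal n = rotN (n % 10) := by
  rw [rotVal, if_pos h]

theorem rotVal_large (n : Nat) (h : ¬ n / 10 = 0) :
    rotVal n = (rotVal (n / 10)).bind fun hv => (rotN (n % 10)).map fun r => hv * 10 + r := by
  rw [rotVal, if_neg h]

theorem rep10_rot (n : Nat) :
    ((rep10 n).all chValid = (rotVal n).isSome) ∧
    (∀ r, rotVal n = some r →
      ((rep10 n).map rotStr = (rep10 r).map (fun c => String.ofList [c]) ∧ (n ≠ 0 → r ≠ 0))) := by
  induction n using Nat.strong_induction_on with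
  | _ n ih =>
    by_cases h10 : n / 10 = 0
    · rw [rep10_small n h10, rotVal_small n h10]
      refine ⟨by simpa using chValid_digitChar (n % 10) (by omega), ?_⟩
      intro r hr
      have hrlt : r < 10 := rotN_lt _ _ hr
      constructor
      · rw [rep10_small r (by omega)]
        simp [rotStr_digitChar (n % 10) r (by omega) hr, Nat.mod_eq_of_lt hrlt]
      · intro hn
        have : n % 10 = n := by omega
        exact rotN_ne_zero (n % 10) r (by omega) hr
    · obtain ⟨ih1, ih2⟩ := ih (n / 10) (Nat.div_lt_self (by omega) (by omega))
      rw [rep10_large n h10, rotVal_large n h10]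
      constructor
      · rw [List.all_append]
        rcases hh : rotVal (n / 10) with _ | h
        · simp [hh] at ih1; simp [ih1]
        · rcases hr : rotN (n % 10) with _ | rl
          · simp [hr, chValid_digitChar (n % 10) (by omega)]
          · simp [hr, chValid_digitChar (n % 10) (by omega), ih1, hh]
      · intro r hrEq
        rcases hh : rotVal (n / 10) with _ | h
        · simp [hh] at hrEq
        · rcases hr : rotN (n % 10) with _ | rl
          · simp [hh, hr] at hrEq
          · rw [hh, hr] at hrEq
            simp only [Option.bind_some, Option.map_some, Option.some.injEq] at hrEq
            have hrl : rl < 10 := rotN_lt _ _ hr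
            obtain ⟨hmap, hne⟩ := ih2 h hh
            have hne' : h ≠ 0 := hne h10
            have hdiv : r / 10 = h := by omega
            have hmod : r % 10 = rl := by omega
            constructor
            · rw [rep10_large r (by omega), hdiv, hmod]
              rw [List.map_append, List.map_append, hmap]
              simp [rotStr_digitChar (n % 10) rl (by omega) hr]
            · intro _; omega

theorem isIntSpace_of_isDigit (c : Char) (h : c.isDigit = true) : PySem.Int.isIntSpace c = false := by
  have hv : 48 ≤ c.toNat ∧ c.toNat ≤ 57 := by simpa [Char.isDigit, Char.le_def] using h
  simp only [PySem.Int.isIntSpace, Bool.or_eq_false_iff, decide_eq_false_iff_not]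
  refine ⟨⟨⟨⟨⟨?_, ?_⟩, ?_⟩, ?_⟩, ?_⟩, ?_⟩ <;>
    (intro he; subst he; simp [Char.toNat] at hv)

theorem dropWhile_all_digit (l : List Char) (h : l.all Char.isDigit = true) :
    List.dropWhile PySem.Int.isIntSpace l = l := by
  cases l with
  | nil => rfl
  | cons c cs =>
    simp only [List.all_cons, Bool.and_eq_true] at h
    rw [List.dropWhile_cons, isIntSpace_of_isDigit c h.1]
    simp

theorem pvDigits?_all_digit : ∀ (cs : List Char) (ad : Bool) (acc : Nat),
    cs.all Char.isDigit = true → cs ≠ [] →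
    pvDigits? cs ad acc = some (cs.foldl (fun a c => a * 10 + (c.toNat - 48)) acc) := by
  intro cs
  induction cs with
  | nil => intro _ _ _ hne; exact absurd rfl hne
  | cons c rest ih =>
    intro ad acc hall _
    simp only [List.all_cons, Bool.and_eq_true] at hall
    rw [pvDigits?.eq_def]
    simp only [if_pos hall.1]
    cases rest with
    | nil => rw [pvDigits?.eq_def]; simp
    | cons d tail =>
      rw [ih true _ hall.2 (by simp)]
      simp

theorem pvSigned?_digits (cs : List Char) (h : cs.all Char.isDigit = true) (hne : cs ≠ []) :
    pvSigned? cs = (pvDigits? cs false 0).map (fun a => (a : Int)) := by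
  cases cs with
  | nil => exact absurd rfl hne
  | cons c rest =>
    simp only [List.all_cons, Bool.and_eq_true] at h
    have hminus : c ≠ '-' := by intro he; subst he; simp [Char.isDigit] at h
    have hplus : c ≠ '+' := by intro he; subst he; simp [Char.isDigit] at h
    rw [pvSigned?.eq_def]
    split
    · rename_i heq; exact absurd (List.cons.injEq .. ▸ heq).1 hminus
    · rename_i heq; exact absurd (List.cons.injEq .. ▸ heq).1 hplus
    · rfl

theorem pvInt?_digits (s : String) (h : s.toList.all Char.isDigit = true) (hne : s.toList ≠ []) :
    pvInt? s = some ((valNat s.toList : Nat) : Int) := by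
  have hrev : s.toList.reverse.all Char.isDigit = true := by simpa using h
  rw [pvInt?, pvStripInt, dropWhile_all_digit _ h, dropWhile_all_digit _ hrev, List.reverse_reverse]
  rw [pvSigned?_digits _ h hne, pvDigits?_all_digit _ false 0 h hne]
  rfl

theorem rotDict_contains (d : Nat) (h : d < 10) :
    rotDict.contains ((d : Nat) : Int) = (rotN d).isSome := by
  interval_cases d <;> decide

theorem rotDict_getD (d rl : Nat) (h : d < 10) (hr : rotN d = some rl) :
    rotDict.getD ((d : Nat) : Int) 0 = ((rl : Nat) : Int) := by
  interval_cases d <;> simp [rotN] at hr <;> subst hr <;> decide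

theorem altGo_eq (n : Nat) : ∀ (place result : Int),
    isValidNumAltGo n place result = (rotVal n).map fun h => result + (h : Int) * place := by
  induction n using Nat.strong_induction_on with
  | _ n ih =>
    intro place result
    rw [isValidNumAltGo]
    by_cases hn : n = 0
    · subst hn
      rw [rotVal_small 0 (by omega)]
      simp [rotN]
    · rw [if_neg hn]
      simp only []
      rcases hr : rotN (n % 10) with _ | rl
      · rw [show rotDict.contains ((n % 10 : Nat) : Int) = false by
          rw [rotDict_contains (n % 10) (by omega), hr]; rfl]
        simp only [Bool.false_eq_true, if_false]
        by_cases h10 : n / 10 = 0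
        · rw [rotVal_small n h10, hr]; rfl
        · rw [rotVal_large n h10]
          rcases rotVal (n / 10) with _ | h <;> simp [hr]
      · rw [show rotDict.contains ((n % 10 : Nat) : Int) = true by
          rw [rotDict_contains (n % 10) (by omega), hr]; rfl]
        simp only [if_true]
        rw [rotDict_getD (n % 10) rl (by omega) hr]
        rw [ih (n / 10) (Nat.div_lt_self (by omega) (by omega))]
        by_cases h10 : n / 10 = 0
        · rw [rotVal_small n h10, hr, h10, rotVal_small 0 (by omega)]
          simp [rotN]
        · rw [rotVal_large n h10]
          rcases rotVal (n / 10) with _ | h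
          · simp
          · simp [hr]
            ring

-- ===== VERDICT (by name: the statement is the Claim_ definition above) =====
theorem isValidNum_spec : Claim_equal_isValidNum := by
  intro digit upperBound _
  unfold Spec_isValidNum
  show isValidNum digit upperBound = isValidNum_alt digit upperBound
  by_cases hneg : digit < 0
  · -- '-' is not a key of validNums: A's loop returns False on its first character
    have htl : (PySem.Int.toStr digit).toList = '-' :: Nat.toDigits 10 digit.natAbs := by
      rw [PySem.Int.toList_toStr, PySem.Int.toChars, if_pos hneg]
    rw [isValidNum]
    simp only [htl]
    rw [isValidNumGo]
    rw [show validNums.contains (String.ofList ['-']) = false from by decide]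
    simp only [Bool.false_eq_true, if_false]
    rw [isValidNum_alt, if_pos hneg]
  · -- digit ≥ 0: both sides are governed by rotVal digit.toNat
    have h0 : (0 : Int) ≤ digit := by omega
    have hdig : ((digit.toNat : Nat) : Int) = digit := Int.toNat_of_nonneg h0
    have htl : (PySem.Int.toStr digit).toList = rep10 digit.toNat := by
      rw [PySem.Int.toList_toStr, PySem.Int.toChars, if_neg hneg, toDigits_eq_rep10]
    rw [isValidNum]
    simp only [htl]
    rw [isValidNumGo_char, (rep10_rot digit.toNat).1]
    rw [isValidNum_alt, if_neg hneg, altGo_eq]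
    rcases hR : rotVal digit.toNat with _ | r
    · rfl
    · obtain ⟨hmap, -⟩ := (rep10_rot digit.toNat).2 r hR
      have hjoin : (PySem.Str.join "" ((rep10 digit.toNat).map rotStr)).toList = rep10 r := by
        rw [PySem.Str.toList_join, hmap, List.map_map]
        have : (String.toList ∘ fun c => String.ofList [c]) = fun c => [c] := by
          funext c; simp [String.toList_ofList]
        rw [this]
        exact PySem.Chars.join_nil_singletons (rep10 r)
      have hparse : pvInt? (PySem.Str.join "" ((rep10 digit.toNat).map rotStr)) = some ((r : Nat) : Int) := by
        rw [pvInt?_digits _ (by rw [hjoin]; exact rep10_all_digit r) (by rw [hjoin]; exact rep10_ne_nil r)]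
        rw [hjoin, valNat_rep10]
      simp only [Option.isSome_some, if_true, List.nil_append, hparse]
      simp
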